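-- pv_equiv track=rewrite | github.com/tanmaya48/algorithm_practice | 18.py | get_all_parenthesis
-- ===== SOURCE A (Python) =====
-- def get_all_parenthesis(n_pairs):
--     if n_pairs < 1:
--         return []
--     if n_pairs == 1:
--         return ['{}']
--
--     n_minus_one_parenthesis = get_all_parenthesis(n_pairs-1)
--     n_parenthesis = []
--
--     for parentheses in n_minus_one_parenthesis:
--         n_parenthesis.append('{'+parentheses+'}')
--         n_parenthesis.append('{}'+parentheses)
--         n_parenthesis.append(parentheses+'{}')
--
--     return list(set(n_parenthesis))
-- ===== SOURCE B (Python) =====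
-- def get_all_parenthesis(n_pairs):
--     if n_pairs < 1:
--         return []
--     result = ['{}']
--     for _ in range(n_pairs - 1):
--         expanded = [c for s in result
--                       for c in ('{' + s + '}', '{}' + s, s + '{}')]
--         result = list(set(expanded))
--     return result
-- ===== Notes on version B (the rewrite author's own statement) =====
-- stated objective: alternative
-- what changed: Replaces the linear recursion with an explicit bottom-up loop over levels, each level built by a flat comprehension and then deduplicated with list(set(...)) exactly as A does per level; Pre_ excludes large n_pairs, where A's deep recursion hits CPython's recursion limit (RecursionError) and no excluded input returns at all.
import Mathlib
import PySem

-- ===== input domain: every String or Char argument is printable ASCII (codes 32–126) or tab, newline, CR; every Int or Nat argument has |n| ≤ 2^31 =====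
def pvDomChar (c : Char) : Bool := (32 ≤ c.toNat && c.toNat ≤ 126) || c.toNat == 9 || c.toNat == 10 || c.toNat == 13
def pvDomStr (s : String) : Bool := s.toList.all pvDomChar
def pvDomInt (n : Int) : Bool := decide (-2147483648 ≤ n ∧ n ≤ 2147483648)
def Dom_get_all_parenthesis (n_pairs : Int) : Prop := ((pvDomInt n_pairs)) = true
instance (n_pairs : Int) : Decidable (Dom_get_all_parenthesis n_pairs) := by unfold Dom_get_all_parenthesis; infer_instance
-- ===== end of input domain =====

-- B replaces A's linear recursion by a bottom-up loop with an order-preserving dedup per level (alternative decomposition, same cost).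


-- ===== PORT A =====
def get_all_parenthesis (n_pairs : Int) : List String :=
  if n_pairs < 1 then []
  else if n_pairs = 1 then ["{}"]
  else
    let n_minus_one_parenthesis := get_all_parenthesis (n_pairs - 1)
    let n_parenthesis := n_minus_one_parenthesis.foldl
      (fun acc parentheses =>
        ((acc ++ ["{" ++ parentheses ++ "}"]) ++ ["{}" ++ parentheses]) ++ [parentheses ++ "{}"]) []
    PySem.Set.ofList n_parenthesis
termination_by n_pairs.toNat
decreasing_by omega

-- ===== PORT B =====
def pvExpand (result : List String) : List String :=
  PySem.Set.ofList (result.flatMap fun s => ["{" ++ s ++ "}", "{}" ++ s, s ++ "{}"])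

def get_all_parenthesis_alt (n_pairs : Int) : List String :=
  if n_pairs < 1 then []
  else (List.range (n_pairs - 1).toNat).foldl (fun result _ => pvExpand result) ["{}"]

-- ===== PRECONDITION & SPEC =====
-- Pre_ excludes large n_pairs: beyond CPython's default recursion limit A's n_pairs-deep linear
-- recursion raises RecursionError (and no excluded input returns at all: the output is exponential).
def Pre_get_all_parenthesis (n_pairs : Int) : Prop := n_pairs ≤ 900
instance (n_pairs : Int) : Decidable (Pre_get_all_parenthesis n_pairs) := by unfold Pre_get_all_parenthesis; infer_instance
def pvWitness_get_all_parenthesis : Int := (3)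

def Spec_get_all_parenthesis (n_pairs : Int) (out : List String) : Prop := out = get_all_parenthesis_alt n_pairs
instance (n_pairs : Int) (out : List String) : Decidable (Spec_get_all_parenthesis n_pairs out) := by unfold Spec_get_all_parenthesis; infer_instance

-- ===== CLAIM (what is proved, stated in full; the proofs are below) =====
def Claim_equal_get_all_parenthesis : Prop := ∀ (n_pairs : Int), Dom_get_all_parenthesis n_pairs → Pre_get_all_parenthesis n_pairs → Spec_get_all_parenthesis n_pairs (get_all_parenthesis n_pairs)

-- ===== LEMMAS AND PROOFS =====

-- A's append-fold over prev equals flatMap, for any accumulator.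
theorem pvFoldl_flat (prev : List String) : ∀ acc : List String,
    prev.foldl
      (fun acc parentheses =>
        ((acc ++ ["{" ++ parentheses ++ "}"]) ++ ["{}" ++ parentheses]) ++ [parentheses ++ "{}"]) acc =
    acc ++ prev.flatMap (fun s => ["{" ++ s ++ "}", "{}" ++ s, s ++ "{}"]) := by
  induction prev with
  | nil => intro acc; simp [List.foldl]
  | cons h t ih => intro acc; simp [List.foldl, List.flatMap]

-- A's one-level expansion (append-fold then set) equals B's (flatMap then dedup).
theorem pvExpand_eq (prev : List String) :
    PySem.Set.ofList (prev.foldl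
      (fun acc parentheses =>
        ((acc ++ ["{" ++ parentheses ++ "}"]) ++ ["{}" ++ parentheses]) ++ [parentheses ++ "{}"]) []) =
    pvExpand prev := by
  unfold pvExpand
  rw [pvFoldl_flat]
  simp

-- For every Nat k, A at k+1 equals k applications of pvExpand to ["{}"].
theorem pvA_level (k : Nat) :
    get_all_parenthesis ((k : Int) + 1) =
    (List.range k).foldl (fun result _ => pvExpand result) ["{}"] := by
  induction k with
  | zero => simp [get_all_parenthesis]
  | succ m ih =>
      have hcast : (((m + 1 : Nat)) : Int) + 1 = (m : Int) + 1 + 1 := by push_cast; ring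
      rw [hcast, get_all_parenthesis, if_neg (by omega), if_neg (by omega)]
      have h3 : (m : Int) + 1 + 1 - 1 = (m : Int) + 1 := by ring
      rw [h3, ih, List.range_succ, List.foldl_append]
      simpa using pvExpand_eq ((List.range m).foldl (fun result _ => pvExpand result) ["{}"])

-- ===== VERDICT (by name: the statement is the Claim_ definition above) =====
theorem get_all_parenthesis_spec : Claim_equal_get_all_parenthesis := by
  intro n _hD _hPre
  unfold Spec_get_all_parenthesis get_all_parenthesis_alt
  by_cases hlt : n < 1
  · rw [get_all_parenthesis]; simp [hlt]
  · have hk : (((n - 1).toNat : Int)) + 1 = n := by omega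
    rw [if_neg hlt, ← hk, pvA_level]
    have : ((((n - 1).toNat : Int)) + 1 - 1).toNat = (n - 1).toNat := by omega
    rw [this]
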